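-- pv_equiv track=rewrite | github.com/mrbartrns/algorithm-and-structure | programmers/lv3/n_expression.py | solution
-- ===== SOURCE A (Python) =====
-- def solution(N, number):
--     if N == number:
--         return 1
--
--     s = [set() for _ in range(8)]
--     for i in range(8):
--         s[i].add(int((i + 1) * str(N)))
--
--     for i in range(1, 8):
--         for j in range(i):
--             for op1 in s[j]:
--                 for op2 in s[i - j - 1]:
--                     s[i].add(op1 + op2)
--                     s[i].add(op1 - op2)
--                     s[i].add(op1 * op2)
--                     if op2 != 0:
--                         s[i].add(op1 // op2)
--
--         if number in s[i]:
--             ans = i + 1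
--             break
--     else:
--         ans = -1
--     return ans
-- ===== SOURCE B (Python) =====
-- def solution(N, number):
--     if N == number:
--         return 1
--     memo = {}
--
--     def reach(k):
--         if k not in memo:
--             acc = {int(str(N) * k)}
--             for i in range(1, k):
--                 for a in reach(i):
--                     for b in reach(k - i):
--                         acc.add(a + b)
--                         acc.add(a - b)
--                         acc.add(a * b)
--                         if b != 0:
--                             acc.add(a // b)
--             memo[k] = acc
--         return memo[k]
--
--     for count in range(2, 9):
--         if number in reach(count):
--             return count
--     return -1
-- ===== Notes on version B (the rewrite author's own statement) =====
-- stated objective: alternative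
-- what changed: Replaces A's bottom-up triple loop over a preallocated array of 8 level-sets with a memoized top-down recursion reach(k) that builds the set of values expressible with exactly k copies of N on demand, searched count = 2..8; Pre_ excludes N < 0 with N != number, where int(str(N)*k) raises ValueError in both programs.
import Mathlib
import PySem

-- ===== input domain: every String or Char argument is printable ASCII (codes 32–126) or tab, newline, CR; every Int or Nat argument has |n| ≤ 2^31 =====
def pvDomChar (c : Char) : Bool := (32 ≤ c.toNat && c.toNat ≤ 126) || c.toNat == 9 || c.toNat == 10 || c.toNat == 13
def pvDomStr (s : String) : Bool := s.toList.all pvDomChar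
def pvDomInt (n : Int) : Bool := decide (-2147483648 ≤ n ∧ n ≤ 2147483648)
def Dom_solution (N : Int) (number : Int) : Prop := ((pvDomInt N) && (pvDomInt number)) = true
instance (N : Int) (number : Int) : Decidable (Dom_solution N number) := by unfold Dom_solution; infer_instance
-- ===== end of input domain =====

-- B replaces A's bottom-up triple loop over an array of 8 level-sets by a memoized top-down
-- recursion reach(k) built on demand (objective: alternative, same cost).

-- Shared by both ports (both Pythons use the same primitives there):
-- int(k * str(N)): build the k-fold copy of str(N) and parse it.  The .getD 0 is a totality
-- guard only: for N < 0 and k ≥ 2 Python's int() raises ValueError (excluded by Pre_).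
def pyRep (N : Int) (k : Nat) : Int :=
  (PySem.Int.ofChars? (PySem.List.pyRepeat (PySem.Int.toChars N) (k : Int))).getD 0

-- Python's set of ints: the PySem.Set list (first-insertion order) is the set's VALUE, and the
-- Std.HashSet mirrors exactly its elements so that s.add(x)'s membership check costs O(1) as in
-- CPython instead of a list scan.  pvSetAdd_fst below proves the first component is literally
-- PySem.Set.add; nothing of the result ever depends on the hash component beyond membership.
def pvSetAdd (p : PySem.Set Int × Std.HashSet Int) (x : Int) : PySem.Set Int × Std.HashSet Int :=
  if p.2.contains x then p else (p.1 ++ [x], p.2.insert x)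

-- set() with one element already added (A: `s[i].add(int(...))`; B: `{int(...)}`)
def pvSingle (x : Int) : PySem.Set Int × Std.HashSet Int :=
  pvSetAdd (PySem.Set.empty, ∅) x

-- ===== PORT A =====
-- s[i] after A's two inner set-loops have run for every j in range(i) (iteration order over a
-- set feeds only set-building and a membership test, so the answer is order-independent)
def levelA (s : List (PySem.Set Int × Std.HashSet Int)) (i : Nat) :
    PySem.Set Int × Std.HashSet Int :=
  (List.range i).foldl
    (fun (acc : PySem.Set Int × Std.HashSet Int) (j : Nat) =>
      (PySem.List.pyGetD s (j : Int) (PySem.Set.empty, ∅)).1.foldl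
        (fun acc a =>
          (PySem.List.pyGetD s ((i : Int) - (j : Int) - 1) (PySem.Set.empty, ∅)).1.foldl
            (fun acc b =>
              let acc := pvSetAdd acc (a + b)
              let acc := pvSetAdd acc (a - b)
              let acc := pvSetAdd acc (a * b)
              if b ≠ 0 then pvSetAdd acc (PySem.Int.floordiv a b) else acc)
            acc)
        acc)
    (PySem.List.pyGetD s (i : Int) (PySem.Set.empty, ∅))

-- `for i in range(1, 8): … if number in s[i]: ans = i + 1; break / else: ans = -1`
def loopA (number : Int) (s : List (PySem.Set Int × Std.HashSet Int)) (i : Nat) : Int :=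
  if i < 8 then
    let si := levelA s i
    if si.2.contains number then ((i : Int) + 1)
    else loopA number (s.set i si) (i + 1)
  else -1
termination_by 8 - i

def solution (N : Int) (number : Int) : Int :=
  if N == number then 1
  else
    -- s = [set() for _ in range(8)]; for i in range(8): s[i].add(int((i + 1) * str(N)))
    let s := (List.range 8).map (fun i => pvSingle (pyRep N (i + 1)))
    loopA number s 1

-- ===== PORT B =====
-- reach(k) of Source B; the memo dict is a pure cache of this functional recursion and is not modelled
def reachB (N : Int) (k : Nat) : PySem.Set Int × Std.HashSet Int :=
  (List.range (k - 1)).attach.foldl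
    (fun acc t =>
      let ri := reachB N (t.1 + 1)
      let rki := reachB N (k - (t.1 + 1))
      ri.1.foldl
        (fun acc a =>
          rki.1.foldl
            (fun acc b =>
              let acc := pvSetAdd acc (a + b)
              let acc := pvSetAdd acc (a - b)
              let acc := pvSetAdd acc (a * b)
              if b ≠ 0 then pvSetAdd acc (PySem.Int.floordiv a b) else acc)
            acc)
        acc)
    (pvSingle (pyRep N k))
termination_by k
decreasing_by
  · have := List.mem_range.mp t.2; omega
  · have := List.mem_range.mp t.2; omega

-- `for count in range(2, 9): if number in reach(count): return count / return -1`
def searchB (N : Int) (number : Int) (c : Nat) : Int :=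
  if c < 9 then
    if (reachB N c).2.contains number then (c : Int) else searchB N number (c + 1)
  else -1
termination_by 9 - c

def solution_alt (N : Int) (number : Int) : Int :=
  if N == number then 1 else searchB N number 2

-- ===== PRECONDITION & SPEC =====
-- Pre_ excludes exactly the inputs where Python A raises: for N < 0 (unless it returns 1 at once
-- because N == number) int((i + 1) * str(N)) is int of e.g. '-3-3', a ValueError.
def Pre_solution (N : Int) (number : Int) : Prop := 0 ≤ N ∨ N = number
instance (N : Int) (number : Int) : Decidable (Pre_solution N number) := by unfold Pre_solution; infer_instance
def pvWitness_solution : Int × Int := (2, 7)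
def Spec_solution (N : Int) (number : Int) (out : Int) : Prop := out = solution_alt N number
instance (N : Int) (number : Int) (out : Int) : Decidable (Spec_solution N number out) := by unfold Spec_solution; infer_instance

-- ===== CLAIM (what is proved, stated in full; the proofs are below) =====
def Claim_equal_solution : Prop := ∀ (N : Int) (number : Int), Dom_solution N number → Pre_solution N number → Spec_solution N number (solution N number)

-- ===== LEMMAS AND PROOFS =====

-- the hash component mirrors the list component
def pvInv (p : PySem.Set Int × Std.HashSet Int) : Prop := ∀ y : Int, y ∈ p.2 ↔ y ∈ p.1

theorem pvSetAdd_fst (p : PySem.Set Int × Std.HashSet Int) (x : Int) (h : pvInv p) :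
    (pvSetAdd p x).1 = PySem.Set.add p.1 x := by
  unfold pvSetAdd PySem.Set.add
  by_cases hm : x ∈ p.1
  · rw [if_pos (Std.HashSet.mem_iff_contains.mp ((h x).mpr hm)),
      if_pos ((PySem.Set.contains_iff p.1 x).mpr hm)]
  · rw [if_neg (fun hc => hm ((h x).mp (Std.HashSet.mem_iff_contains.mpr hc))),
      if_neg (fun hc => hm ((PySem.Set.contains_iff p.1 x).mp hc))]

theorem pvSetAdd_inv (p : PySem.Set Int × Std.HashSet Int) (x : Int) (h : pvInv p) :
    pvInv (pvSetAdd p x) := by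
  unfold pvSetAdd
  split
  · exact h
  · intro y
    simp only [Std.HashSet.mem_insert, List.mem_append, List.mem_singleton, beq_iff_eq]
    rw [h y]
    tauto

theorem pvInv_single (x : Int) : pvInv (pvSingle x) :=
  pvSetAdd_inv _ x (fun y => by
    simp [PySem.Set.empty, Std.HashSet.not_mem_empty])

theorem pvSingle_fst (x : Int) : (pvSingle x).1 = [x] := by
  rw [pvSingle, pvSetAdd_fst _ _ (fun y => by simp [PySem.Set.empty, Std.HashSet.not_mem_empty])]
  simp [PySem.Set.add, PySem.Set.empty, PySem.Set.contains]

-- a fold with pvSetAdd-built pairs projects to the corresponding pure PySem.Set fold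
theorem foldl_pair {α : Type} (g : (PySem.Set Int × Std.HashSet Int) → α → (PySem.Set Int × Std.HashSet Int))
    (f : PySem.Set Int → α → PySem.Set Int)
    (hfst : ∀ p y, pvInv p → (g p y).1 = f p.1 y)
    (hinv : ∀ p y, pvInv p → pvInv (g p y)) :
    ∀ (v : List α) (acc : PySem.Set Int × Std.HashSet Int), pvInv acc →
      (v.foldl g acc).1 = v.foldl f acc.1 ∧ pvInv (v.foldl g acc) := by
  intro v
  induction v with
  | nil => exact fun acc h => ⟨rfl, h⟩
  | cons y v ih =>
    intro acc h
    simp only [List.foldl_cons]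
    obtain ⟨h1, h2⟩ := ih (g acc y) (hinv acc y h)
    exact ⟨by rw [h1, hfst acc y h], h2⟩

-- the four set-inserts of one (a, b) pair, pure form (the shared inner loop body of both Pythons)
def addOps (acc : PySem.Set Int) (a b : Int) : PySem.Set Int :=
  let acc := PySem.Set.add acc (a + b)
  let acc := PySem.Set.add acc (a - b)
  let acc := PySem.Set.add acc (a * b)
  if b ≠ 0 then PySem.Set.add acc (PySem.Int.floordiv a b) else acc

-- the pair form used by the ports
def addOpsP (acc : PySem.Set Int × Std.HashSet Int) (a b : Int) : PySem.Set Int × Std.HashSet Int :=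
  let acc := pvSetAdd acc (a + b)
  let acc := pvSetAdd acc (a - b)
  let acc := pvSetAdd acc (a * b)
  if b ≠ 0 then pvSetAdd acc (PySem.Int.floordiv a b) else acc

theorem addOpsP_fst (acc : PySem.Set Int × Std.HashSet Int) (a b : Int) (h : pvInv acc) :
    (addOpsP acc a b).1 = addOps acc.1 a b := by
  unfold addOpsP addOps
  have h1 := pvSetAdd_inv acc (a + b) h
  have h2 := pvSetAdd_inv _ (a - b) h1
  have h3 := pvSetAdd_inv _ (a * b) h2
  split
  · rw [pvSetAdd_fst _ _ h3, pvSetAdd_fst _ _ h2, pvSetAdd_fst _ _ h1, pvSetAdd_fst _ _ h]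
  · rw [pvSetAdd_fst _ _ h2, pvSetAdd_fst _ _ h1, pvSetAdd_fst _ _ h]

theorem addOpsP_inv (acc : PySem.Set Int × Std.HashSet Int) (a b : Int) (h : pvInv acc) :
    pvInv (addOpsP acc a b) := by
  unfold addOpsP
  have h3 := pvSetAdd_inv _ (a * b) (pvSetAdd_inv _ (a - b) (pvSetAdd_inv acc (a + b) h))
  split
  · exact pvSetAdd_inv _ _ h3
  · exact h3

-- the double loop `for a in u: for b in v: <addOps>`, pure form
def comboFold (u v : List Int) (acc : PySem.Set Int) : PySem.Set Int :=
  u.foldl (fun acc a => v.foldl (fun acc b => addOps acc a b) acc) acc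

-- and pair form
def comboFoldP (u v : List Int) (acc : PySem.Set Int × Std.HashSet Int) :
    PySem.Set Int × Std.HashSet Int :=
  u.foldl (fun acc a => v.foldl (fun acc b => addOpsP acc a b) acc) acc

theorem comboFoldP_pair (u v : List Int) (acc : PySem.Set Int × Std.HashSet Int) (h : pvInv acc) :
    (comboFoldP u v acc).1 = comboFold u v acc.1 ∧ pvInv (comboFoldP u v acc) := by
  unfold comboFoldP comboFold
  refine foldl_pair _ _ ?_ ?_ u acc h
  · intro p a hp
    exact (foldl_pair (fun acc b => addOpsP acc a b) (fun acc b => addOps acc a b)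
      (fun q b hq => addOpsP_fst q a b hq) (fun q b hq => addOpsP_inv q a b hq) v p hp).1
  · intro p a hp
    exact (foldl_pair (fun acc b => addOpsP acc a b) (fun acc b => addOps acc a b)
      (fun q b hq => addOpsP_fst q a b hq) (fun q b hq => addOpsP_inv q a b hq) v p hp).2

def opsP (a b x : Int) : Prop :=
  x = a + b ∨ x = a - b ∨ x = a * b ∨ (b ≠ 0 ∧ x = PySem.Int.floordiv a b)

def comboP (u v : List Int) (x : Int) : Prop := ∃ a ∈ u, ∃ b ∈ v, opsP a b x

theorem mem_addOps (acc : PySem.Set Int) (a b x : Int) :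
    x ∈ addOps acc a b ↔ x ∈ acc ∨ opsP a b x := by
  unfold addOps opsP
  split_ifs with hb <;> simp [PySem.Set.mem_add] <;> tauto

theorem mem_innerFold (v : List Int) (a x : Int) :
    ∀ acc, x ∈ v.foldl (fun acc b => addOps acc a b) acc ↔ x ∈ acc ∨ ∃ b ∈ v, opsP a b x := by
  induction v with
  | nil => simp
  | cons b v ih =>
    intro acc
    simp only [List.foldl_cons, ih, mem_addOps, List.mem_cons]
    constructor
    · rintro ((h | h) | ⟨b', hb', h⟩)
      · exact Or.inl h
      · exact Or.inr ⟨b, Or.inl rfl, h⟩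
      · exact Or.inr ⟨b', Or.inr hb', h⟩
    · rintro (h | ⟨b', (rfl | hb'), h⟩)
      · exact Or.inl (Or.inl h)
      · exact Or.inl (Or.inr h)
      · exact Or.inr ⟨b', hb', h⟩

theorem mem_comboFold (u v : List Int) (x : Int) :
    ∀ acc, x ∈ comboFold u v acc ↔ x ∈ acc ∨ comboP u v x := by
  induction u with
  | nil => simp [comboFold, comboP]
  | cons a u ih =>
    intro acc
    simp only [comboFold, List.foldl_cons] at *
    rw [ih, mem_innerFold]
    unfold comboP
    constructor
    · rintro ((h | ⟨b, hb, h⟩) | ⟨a', ha', h⟩)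
      · exact Or.inl h
      · exact Or.inr ⟨a, by simp, b, hb, h⟩
      · exact Or.inr ⟨a', by simp [ha'], h⟩
    · rintro (h | ⟨a', ha', b, hb, h⟩)
      · exact Or.inl (Or.inl h)
      · rcases List.mem_cons.mp ha' with rfl | ha'
        · exact Or.inl (Or.inr ⟨b, hb, h⟩)
        · exact Or.inr ⟨a', ha', b, hb, h⟩

theorem comboP_congr {u u' v v' : List Int} (hu : ∀ y, y ∈ u ↔ y ∈ u') (hv : ∀ y, y ∈ v ↔ y ∈ v') (x : Int) :
    comboP u v x ↔ comboP u' v' x := by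
  unfold comboP
  constructor
  · rintro ⟨a, ha, b, hb, h⟩; exact ⟨a, (hu a).mp ha, b, (hv b).mp hb, h⟩
  · rintro ⟨a, ha, b, hb, h⟩; exact ⟨a, (hu a).mpr ha, b, (hv b).mpr hb, h⟩

theorem mem_rangeFold (F G : Nat → List Int) (x : Int) :
    ∀ (n : Nat) (acc : PySem.Set Int),
      x ∈ (List.range n).foldl (fun acc j => comboFold (F j) (G j) acc) acc ↔
        x ∈ acc ∨ ∃ j < n, comboP (F j) (G j) x := by
  intro n
  induction n with
  | zero => simp
  | succ n ih =>
    intro acc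
    rw [List.range_succ, List.foldl_append]
    simp only [List.foldl_cons, List.foldl_nil]
    rw [mem_comboFold, ih]
    constructor
    · rintro ((h | ⟨j, hj, h⟩) | h)
      · exact Or.inl h
      · exact Or.inr ⟨j, by omega, h⟩
      · exact Or.inr ⟨n, by omega, h⟩
    · rintro (h | ⟨j, hj, h⟩)
      · exact Or.inl (Or.inl h)
      · rcases Nat.lt_succ_iff_lt_or_eq.mp hj with hj | rfl
        · exact Or.inl (Or.inr ⟨j, hj, h⟩)
        · exact Or.inr h

-- pair-fold over a range with index-dependent operand lists: projection + invariant
theorem rangeFoldP_pair (F G : Nat → List Int) :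
    ∀ (n : Nat) (acc : PySem.Set Int × Std.HashSet Int), pvInv acc →
      ((List.range n).foldl (fun acc j => comboFoldP (F j) (G j) acc) acc).1 =
        (List.range n).foldl (fun acc j => comboFold (F j) (G j) acc) acc.1 ∧
      pvInv ((List.range n).foldl (fun acc j => comboFoldP (F j) (G j) acc) acc) := by
  intro n acc h
  exact foldl_pair _ _ (fun p j hp => (comboFoldP_pair (F j) (G j) p hp).1)
    (fun p j hp => (comboFoldP_pair (F j) (G j) p hp).2) (List.range n) acc h

theorem levelA_eq (s : List (PySem.Set Int × Std.HashSet Int)) (i : Nat) :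
    levelA s i =
      (List.range i).foldl
        (fun (acc : PySem.Set Int × Std.HashSet Int) (j : Nat) =>
          comboFoldP (PySem.List.pyGetD s (j : Int) (PySem.Set.empty, ∅)).1
            (PySem.List.pyGetD s ((i : Int) - (j : Int) - 1) (PySem.Set.empty, ∅)).1 acc)
        (PySem.List.pyGetD s (i : Int) (PySem.Set.empty, ∅)) := rfl

theorem reachB_eq (N : Int) (k : Nat) :
    reachB N k =
      (List.range (k - 1)).foldl
        (fun acc j => comboFoldP (reachB N (j + 1)).1 (reachB N (k - (j + 1))).1 acc)
        (pvSingle (pyRep N k)) := by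
  rw [reachB]
  exact List.foldl_attach (l := List.range (k - 1))
    (f := fun acc j => comboFoldP (reachB N (j + 1)).1 (reachB N (k - (j + 1))).1 acc)
    (b := pvSingle (pyRep N k))

theorem reachB_pair (N : Int) (k : Nat) :
    (reachB N k).1 =
      (List.range (k - 1)).foldl
        (fun acc j => comboFold (reachB N (j + 1)).1 (reachB N (k - (j + 1))).1 acc)
        [pyRep N k] ∧ pvInv (reachB N k) := by
  rw [reachB_eq]
  have h := rangeFoldP_pair (fun j => (reachB N (j + 1)).1) (fun j => (reachB N (k - (j + 1))).1)
    (k - 1) (pvSingle (pyRep N k)) (pvInv_single _)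
  rwa [pvSingle_fst] at h

theorem reachB_one (N : Int) : (reachB N 1).1 = [pyRep N 1] := by
  have h := (reachB_pair N 1).1
  simpa using h

-- the loop invariant on A's array s before level i is built: every entry's hash mirrors its list,
-- levels below i already agree with reach, levels from i up are the untouched repunit singletons
def SInv (N : Int) (s : List (PySem.Set Int × Std.HashSet Int)) (i : Nat) : Prop :=
  s.length = 8 ∧
  (∀ j, j < 8 → pvInv (s.getD j (PySem.Set.empty, ∅))) ∧
  (∀ j, j < i → ∀ x, x ∈ (s.getD j (PySem.Set.empty, ∅)).1 ↔ x ∈ (reachB N (j + 1)).1) ∧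
  (∀ j, i ≤ j → j < 8 → (s.getD j (PySem.Set.empty, ∅)).1 = [pyRep N (j + 1)])

theorem pyGetD_nat (s : List (PySem.Set Int × Std.HashSet Int)) (j : Nat) :
    PySem.List.pyGetD s (j : Int) (PySem.Set.empty, ∅) = s.getD j (PySem.Set.empty, ∅) := by
  simp [pysem]

theorem levelA_pair (N : Int) (s : List (PySem.Set Int × Std.HashSet Int)) (i : Nat)
    (hinv : SInv N s i) (h1 : 1 ≤ i) (h8 : i < 8) :
    (∀ x, x ∈ (levelA s i).1 ↔ x ∈ (reachB N (i + 1)).1) ∧ pvInv (levelA s i) := by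
  obtain ⟨hlen, hpv, hlo, hhi⟩ := hinv
  rw [levelA_eq]
  have hbase : PySem.List.pyGetD s (i : Int) (PySem.Set.empty, ∅) = s.getD i (PySem.Set.empty, ∅) :=
    pyGetD_nat s i
  have hbase1 : (s.getD i (PySem.Set.empty, ∅)).1 = [pyRep N (i + 1)] := hhi i le_rfl h8
  have hp := rangeFoldP_pair (fun j => (PySem.List.pyGetD s (j : Int) (PySem.Set.empty, ∅)).1)
    (fun j => (PySem.List.pyGetD s ((i : Int) - (j : Int) - 1) (PySem.Set.empty, ∅)).1)
    i (PySem.List.pyGetD s (i : Int) (PySem.Set.empty, ∅)) (by rw [hbase]; exact hpv i h8)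
  refine ⟨?_, hp.2⟩
  intro x
  rw [hp.1]
  have hA := mem_rangeFold (fun j => (PySem.List.pyGetD s (j : Int) (PySem.Set.empty, ∅)).1)
    (fun j => (PySem.List.pyGetD s ((i : Int) - (j : Int) - 1) (PySem.Set.empty, ∅)).1) x i
    (PySem.List.pyGetD s (i : Int) (PySem.Set.empty, ∅)).1
  have hB := (reachB_pair N (i + 1)).1
  have h1' : (i + 1) - 1 = i := by omega
  rw [h1'] at hB
  have hBf := mem_rangeFold (fun j => (reachB N (j + 1)).1)
    (fun j => (reachB N ((i + 1) - (j + 1))).1) x i [pyRep N (i + 1)]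
  simp only at hA hBf
  rw [hA, hB, hBf, hbase, hbase1]
  apply or_congr Iff.rfl
  constructor
  · rintro ⟨j, hj, h⟩
    refine ⟨j, hj, ?_⟩
    have e1 : ((i : Int) - (j : Int) - 1) = ((i - j - 1 : Nat) : Int) := by omega
    rw [pyGetD_nat, e1, pyGetD_nat] at h
    have e2 : (i + 1) - (j + 1) = (i - j - 1) + 1 := by omega
    rw [e2]
    exact (comboP_congr (hlo j hj) (hlo (i - j - 1) (by omega)) x).mp h
  · rintro ⟨j, hj, h⟩
    refine ⟨j, hj, ?_⟩
    have e1 : ((i : Int) - (j : Int) - 1) = ((i - j - 1 : Nat) : Int) := by omega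
    rw [pyGetD_nat, e1, pyGetD_nat]
    have e2 : (i + 1) - (j + 1) = (i - j - 1) + 1 := by omega
    rw [e2] at h
    exact (comboP_congr (hlo j hj) (hlo (i - j - 1) (by omega)) x).mpr h

theorem getD_set_self (s : List (PySem.Set Int × Std.HashSet Int)) (i : Nat)
    (v : PySem.Set Int × Std.HashSet Int) (h : i < s.length) :
    (s.set i v).getD i (PySem.Set.empty, ∅) = v := by
  simp [List.getD_eq_getElem?_getD, h]

theorem getD_set_ne (s : List (PySem.Set Int × Std.HashSet Int)) (i j : Nat)
    (v : PySem.Set Int × Std.HashSet Int) (h : i ≠ j) :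
    (s.set i v).getD j (PySem.Set.empty, ∅) = s.getD j (PySem.Set.empty, ∅) := by
  simp [List.getD_eq_getElem?_getD, List.getElem?_set_ne h]

theorem SInv_step (N : Int) (s : List (PySem.Set Int × Std.HashSet Int)) (i : Nat)
    (hinv : SInv N s i) (h1 : 1 ≤ i) (h8 : i < 8) :
    SInv N (s.set i (levelA s i)) (i + 1) := by
  obtain ⟨hlen, hpv, hlo, hhi⟩ := hinv
  have hL := levelA_pair N s i ⟨hlen, hpv, hlo, hhi⟩ h1 h8
  refine ⟨by simp [hlen], ?_, ?_, ?_⟩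
  · intro j hj
    by_cases hij : i = j
    · subst hij; rw [getD_set_self s i _ (by omega)]; exact hL.2
    · rw [getD_set_ne s i j _ hij]; exact hpv j hj
  · intro j hj x
    rcases Nat.lt_succ_iff_lt_or_eq.mp hj with hj | rfl
    · rw [getD_set_ne s i j _ (by omega)]
      exact hlo j hj x
    · rw [getD_set_self s j _ (by omega)]
      exact hL.1 x
  · intro j hij hj8
    rw [getD_set_ne s i j _ (by omega)]
    exact hhi j (by omega) hj8

theorem contains2_iff (p : PySem.Set Int × Std.HashSet Int) (h : pvInv p) (x : Int) :
    p.2.contains x = true ↔ x ∈ p.1 := by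
  rw [← Std.HashSet.mem_iff_contains]
  exact h x

theorem loop_eq (N number : Int) :
    ∀ (d i : Nat) (s : List (PySem.Set Int × Std.HashSet Int)), 8 - i = d → 1 ≤ i → i ≤ 8 →
      SInv N s i → loopA number s i = searchB N number (i + 1) := by
  intro d
  induction d with
  | zero =>
    intro i s hd h1 h8 hinv
    have : i = 8 := by omega
    subst this
    rw [loopA, searchB]
    norm_num
  | succ d ih =>
    intro i s hd h1 h8 hinv
    have hlt : i < 8 := by omega
    rw [loopA, searchB]
    simp only [hlt, if_pos, show i + 1 < 9 by omega]
    have hL := levelA_pair N s i hinv h1 hlt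
    have hR := (reachB_pair N (i + 1)).2
    have hmem : number ∈ (levelA s i).1 ↔ number ∈ (reachB N (i + 1)).1 := hL.1 number
    by_cases hc : number ∈ (levelA s i).1
    · rw [if_pos ((contains2_iff _ hL.2 number).mpr hc),
        if_pos ((contains2_iff _ hR number).mpr (hmem.mp hc))]
      push_cast
      ring
    · rw [if_neg (fun h => hc ((contains2_iff _ hL.2 number).mp h)),
        if_neg (fun h => hc (hmem.mpr ((contains2_iff _ hR number).mp h)))]
      exact ih (i + 1) (s.set i (levelA s i)) (by omega) (by omega) (by omega)
        (SInv_step N s i hinv h1 hlt)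

theorem SInv_init (N : Int) :
    SInv N ((List.range 8).map (fun i => pvSingle (pyRep N (i + 1)))) 1 := by
  have hget : ∀ j : Nat, j < 8 →
      ((List.range 8).map (fun i => pvSingle (pyRep N (i + 1)))).getD j (PySem.Set.empty, ∅)
        = pvSingle (pyRep N (j + 1)) := by
    intro j hj
    interval_cases j <;> simp [List.range_succ, List.getD]
  refine ⟨by simp, ?_, ?_, ?_⟩
  · intro j hj
    rw [hget j hj]
    exact pvInv_single _
  · intro j hj x
    have : j = 0 := by omega
    subst this
    rw [hget 0 (by omega), pvSingle_fst, reachB_one]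
  · intro j h1j hj8
    rw [hget j hj8, pvSingle_fst]

-- ===== VERDICT (by name: the statement is the Claim_ definition above) =====
theorem solution_spec : Claim_equal_solution := by
  unfold Claim_equal_solution
  intro N number _ _
  unfold Spec_solution solution solution_alt
  by_cases h : N == number
  · simp [h]
  · simp only [h, Bool.false_eq_true, if_false]
    exact loop_eq N number 7 1
      ((List.range 8).map (fun i => pvSingle (pyRep N (i + 1))))
      (by omega) (by omega) (by omega) (SInv_init N)
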